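-- pv_equiv track=rewrite | github.com/Matrixioo/python-codes | oop-python/2023/algoritmization/dragon_curve.py | dragon_curve_cords
-- ===== SOURCE A (Python) =====
-- def dragon_curve_cords(sequence, length):
--     direction = 0
--     x, y = 0, 0
--     points = [(x, y)]
--     for letter in sequence:
--         if letter == 'F':
--             if direction == 0:
--                 x += length
--             elif direction == 90:
--                 y += length
--             elif direction == 180:
--                 x -= length
--             elif direction == 270:
--                 y -= length
--             points.append((x, y))
--         elif letter == '+':
--             direction = (direction + 90) % 360
--         elif letter == '-':
--             direction = (direction - 90) % 360
--     return points
-- ===== SOURCE B (Python) =====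
-- def dragon_curve_cords(sequence, length):
--     # Stage 1: reduce the L-system string to a list of heading indices,
--     # one per 'F', where the heading is the net turn count modulo 4.
--     moves = []
--     turns = 0
--     for letter in sequence:
--         if letter == 'F':
--             moves.append(turns % 4)
--         elif letter == '+':
--             turns += 1
--         elif letter == '-':
--             turns -= 1
--     # Stage 2: prefix-sum the step vectors looked up in a table.
--     steps = [(length, 0), (0, length), (-length, 0), (0, -length)]
--     points = [(0, 0)]
--     x, y = 0, 0
--     for m in moves:
--         dx, dy = steps[m]
--         x += dx
--         y += dy
--         points.append((x, y))
--     return points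
-- ===== Notes on version B (the rewrite author's own statement) =====
-- stated objective: alternative
-- what changed: Replaces the single-pass angle-state walk with a staged pipeline: a first pass compiles the string into a list of heading indices (net turn count mod 4 per 'F'), then a second pass prefix-sums step vectors looked up in a 4-entry table, eliminating the 90-degree angle arithmetic and the 4-way movement branch.
import Mathlib
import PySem

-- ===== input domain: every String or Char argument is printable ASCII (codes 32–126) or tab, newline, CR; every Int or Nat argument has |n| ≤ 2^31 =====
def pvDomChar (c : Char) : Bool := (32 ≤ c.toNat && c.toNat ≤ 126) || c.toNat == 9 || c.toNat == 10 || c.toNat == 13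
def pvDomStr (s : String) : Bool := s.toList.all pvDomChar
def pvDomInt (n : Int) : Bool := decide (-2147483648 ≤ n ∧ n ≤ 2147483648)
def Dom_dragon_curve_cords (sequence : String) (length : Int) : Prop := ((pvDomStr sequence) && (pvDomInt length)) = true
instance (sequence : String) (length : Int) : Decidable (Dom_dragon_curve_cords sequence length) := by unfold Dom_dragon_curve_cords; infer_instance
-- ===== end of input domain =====

-- B compiles the string into a list of heading indices (net turns mod 4) in one pass, then prefix-sums table-looked-up step vectors in a second pass; alternative staged decomposition, same cost.


-- ===== PORT A =====
-- state: (direction, x, y, points); 'F' moves by the branch on direction, '+'/'-' adjust the angle mod 360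
def dragonStepA (length : Int) (st : Int × Int × Int × List (Int × Int)) (letter : Char) :
    Int × Int × Int × List (Int × Int) :=
  let (direction, x, y, points) := st
  if letter = 'F' then
    let (x, y) :=
      if direction = 0 then (x + length, y)
      else if direction = 90 then (x, y + length)
      else if direction = 180 then (x - length, y)
      else if direction = 270 then (x, y - length)
      else (x, y)
    (direction, x, y, points ++ [(x, y)])
  else if letter = '+' then (PySem.Int.mod (direction + 90) 360, x, y, points)
  else if letter = '-' then (PySem.Int.mod (direction - 90) 360, x, y, points)
  else (direction, x, y, points)

def dragon_curve_cords (sequence : String) (length : Int) : List (Int × Int) :=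
  (sequence.toList.foldl (dragonStepA length) (0, 0, 0, [(0, 0)])).2.2.2

-- ===== PORT B =====
-- stage 1: compile the string to a list of heading indices (net turn count mod 4 per 'F')
def collectStep (st : Int × List Int) (letter : Char) : Int × List Int :=
  let (turns, moves) := st
  if letter = 'F' then (turns, moves ++ [PySem.Int.mod turns 4])
  else if letter = '+' then (turns + 1, moves)
  else if letter = '-' then (turns - 1, moves)
  else (turns, moves)

-- the 4-entry step table steps[m] (m is always turns % 4 ∈ {0,1,2,3})
def stepTable (length m : Int) : Int × Int :=
  if m = 0 then (length, 0)
  else if m = 1 then (0, length)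
  else if m = 2 then (-length, 0)
  else (0, -length)

-- stage 2: prefix-sum the step vectors
def accStep (length : Int) (st : Int × Int × List (Int × Int)) (m : Int) :
    Int × Int × List (Int × Int) :=
  let (x, y, points) := st
  let (dx, dy) := stepTable length m
  (x + dx, y + dy, points ++ [(x + dx, y + dy)])

def dragon_curve_cords_alt (sequence : String) (length : Int) : List (Int × Int) :=
  let moves := (sequence.toList.foldl collectStep (0, [])).2
  (moves.foldl (accStep length) (0, 0, [(0, 0)])).2.2

-- ===== PRECONDITION & SPEC =====
def Spec_dragon_curve_cords (sequence : String) (length : Int) (out : List (Int × Int)) : Prop := out = dragon_curve_cords_alt sequence length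
instance (sequence : String) (length : Int) (out : List (Int × Int)) : Decidable (Spec_dragon_curve_cords sequence length out) := by unfold Spec_dragon_curve_cords; infer_instance

-- ===== CLAIM (what is proved, stated in full; the proofs are below) =====
def Claim_equal_dragon_curve_cords : Prop := ∀ (sequence : String) (length : Int), Dom_dragon_curve_cords sequence length → Spec_dragon_curve_cords sequence length (dragon_curve_cords sequence length)

-- ===== LEMMAS AND PROOFS =====

-- stage-1 fold: the accumulated moves list is a prefix (turns part is independent of it)
theorem collect_append (cs : List Char) : ∀ (t : Int) (ms : List Int),
    cs.foldl collectStep (t, ms) =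
      ((cs.foldl collectStep (t, [])).1, ms ++ (cs.foldl collectStep (t, [])).2) := by
  induction cs with
  | nil => intro t ms; simp [List.foldl]
  | cons c cs ih =>
    intro t ms
    simp only [List.foldl]
    by_cases hF : c = 'F'
    · subst hF
      simp only [collectStep, if_true]
      rw [ih t (ms ++ [PySem.Int.mod t 4]), ih t ([] ++ [PySem.Int.mod t 4])]
      simp
    · by_cases hP : c = '+'
      · subst hP
        simp only [collectStep, if_neg (by decide : ¬ ('+' = 'F'))]
        exact ih (t + 1) ms
      · by_cases hM : c = '-'
        · subst hM
          simp only [collectStep, if_neg (by decide : ¬ ('-' = 'F')),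
            if_neg (by decide : ¬ ('-' = '+'))]
          exact ih (t - 1) ms
        · simp only [collectStep, if_neg hF, if_neg hP, if_neg hM]
          exact ih t ms

-- main loop invariant: A's walk from angle 90*t%360 equals B's two stages from turn count t
theorem dragon_loop_eq (length : Int) (cs : List Char) :
    ∀ (t x y : Int) (pts : List (Int × Int)),
      (cs.foldl (dragonStepA length) (PySem.Int.mod (90 * t) 360, x, y, pts)).2.2.2 =
      ((cs.foldl collectStep (t, [])).2.foldl (accStep length) (x, y, pts)).2.2 := by
  induction cs with
  | nil => intro t x y pts; simp [List.foldl]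
  | cons c cs ih =>
    intro t x y pts
    simp only [List.foldl]
    by_cases hF : c = 'F'
    · subst hF
      have hm : PySem.Int.mod t 4 = 0 ∨ PySem.Int.mod t 4 = 1 ∨
          PySem.Int.mod t 4 = 2 ∨ PySem.Int.mod t 4 = 3 := by
        have h1 : (0:Int) ≤ PySem.Int.mod t 4 := PySem.Int.mod_nonneg t (by norm_num)
        have h2 : PySem.Int.mod t 4 < 4 := PySem.Int.mod_lt t (by norm_num)
        omega
      have hc : collectStep (t, ([] : List Int)) 'F' = (t, [PySem.Int.mod t 4]) := by
        simp [collectStep]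
      rw [hc, collect_append cs t [PySem.Int.mod t 4], List.foldl_append]
      have hA : dragonStepA length (PySem.Int.mod (90 * t) 360, x, y, pts) 'F' =
          (PySem.Int.mod (90 * t) 360,
            x + (stepTable length (PySem.Int.mod t 4)).1,
            y + (stepTable length (PySem.Int.mod t 4)).2,
            pts ++ [(x + (stepTable length (PySem.Int.mod t 4)).1,
                     y + (stepTable length (PySem.Int.mod t 4)).2)]) := by
        have h4 : PySem.Int.mod t 4 = t % 4 := PySem.Int.mod_eq_emod_of_pos (by norm_num)
        rcases hm with h | h | h | h <;> rw [h4] at h <;>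
          simp [dragonStepA, stepTable, h, Prod.ext_iff] <;>
          split_ifs <;> simp_all <;> omega
      have hB : List.foldl (accStep length) (x, y, pts) [PySem.Int.mod t 4] =
          (x + (stepTable length (PySem.Int.mod t 4)).1,
           y + (stepTable length (PySem.Int.mod t 4)).2,
           pts ++ [(x + (stepTable length (PySem.Int.mod t 4)).1,
                    y + (stepTable length (PySem.Int.mod t 4)).2)]) := by
        simp [List.foldl, accStep]
      rw [hA, hB]
      exact ih t _ _ _
    · by_cases hP : c = '+'
      · subst hP
        have hA : dragonStepA length (PySem.Int.mod (90 * t) 360, x, y, pts) '+' =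
            (PySem.Int.mod (90 * (t + 1)) 360, x, y, pts) := by
          simp [dragonStepA]; omega
        have hc : collectStep (t, ([] : List Int)) '+' = (t + 1, []) := by
          simp [collectStep]
        rw [hA, hc]
        exact ih (t + 1) x y pts
      · by_cases hM : c = '-'
        · subst hM
          have hA : dragonStepA length (PySem.Int.mod (90 * t) 360, x, y, pts) '-' =
              (PySem.Int.mod (90 * (t - 1)) 360, x, y, pts) := by
            simp [dragonStepA]; omega
          have hc : collectStep (t, ([] : List Int)) '-' = (t - 1, []) := by
            simp [collectStep]
          rw [hA, hc]
          exact ih (t - 1) x y pts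
        · have hA : dragonStepA length (PySem.Int.mod (90 * t) 360, x, y, pts) c =
              (PySem.Int.mod (90 * t) 360, x, y, pts) := by
            simp [dragonStepA, hF, hP, hM]
          have hc : collectStep (t, ([] : List Int)) c = (t, []) := by
            simp [collectStep, hF, hP, hM]
          rw [hA, hc]
          exact ih t x y pts

-- ===== VERDICT (by name: the statement is the Claim_ definition above) =====
theorem dragon_curve_cords_spec : Claim_equal_dragon_curve_cords := by
  intro sequence length _
  have h := dragon_loop_eq length sequence.toList 0 0 0 [(0, 0)]
  simpa [Spec_dragon_curve_cords, dragon_curve_cords, dragon_curve_cords_alt,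
    PySem.Int.mod] using h
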